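-- pv_equiv track=rewrite | github.com/hurtos10/gitcurso15052024 | script.py | primeros_impares
-- ===== SOURCE A (Python) =====
-- def es_impar(num):
--     return num % 2 != 0
--
-- def primeros_impares(num):
--     impares = []
--     while num > 0 and len(impares) < 3:
--         digito = num % 10
--         if es_impar(digito):
--             impares.append(digito)
--         num //= 10
--     return impares
-- ===== SOURCE B (Python) =====
-- def primeros_impares(num):
--     if num <= 0:
--         return []
--     return [ord(c) - 48 for c in reversed(str(num)) if c in '13579'][:3]
-- ===== Notes on version B (the rewrite author's own statement) =====
-- stated objective: idiomatic
-- what changed: A extracts digits arithmetically (num % 10, num //= 10) in a while loop that stops after three odd digits; B never does digit arithmetic: it renders the number with str(num), scans the characters in reverse, keeps those in '13579' and takes the first three.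
import Mathlib
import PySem

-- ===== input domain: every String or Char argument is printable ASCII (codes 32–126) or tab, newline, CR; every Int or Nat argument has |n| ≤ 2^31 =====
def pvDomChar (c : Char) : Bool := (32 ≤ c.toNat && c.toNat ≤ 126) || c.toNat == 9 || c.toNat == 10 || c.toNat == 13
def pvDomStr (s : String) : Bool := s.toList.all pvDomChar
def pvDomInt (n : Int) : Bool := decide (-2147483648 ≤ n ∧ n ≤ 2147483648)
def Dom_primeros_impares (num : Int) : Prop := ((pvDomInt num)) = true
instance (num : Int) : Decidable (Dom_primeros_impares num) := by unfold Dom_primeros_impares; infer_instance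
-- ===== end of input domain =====

-- B never does digit arithmetic: it renders the number with str(num) and scans the characters in
-- reverse, keeping those in '13579' and taking the first three (objective: idiomatic; same results).


-- termination helper for A's loop: num // 10 strictly shrinks for positive num
theorem pvDiv10_lt (num : Int) (h : 0 < num) :
    (PySem.Int.floordiv num 10).toNat < num.toNat := by
  rw [PySem.Int.floordiv_eq_ediv_of_pos (by omega)]
  omega

-- ===== PORT A =====
def es_impar (num : Int) : Bool := PySem.Int.mod num 2 != 0

-- the while loop of A, state = (num, impares)
def primerosLoopA (num : Int) (impares : List Int) : List Int :=
  if h : 0 < num ∧ impares.length < 3 then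
    let digito := PySem.Int.mod num 10
    primerosLoopA (PySem.Int.floordiv num 10)
      (if es_impar digito then impares ++ [digito] else impares)
  else impares
termination_by num.toNat
decreasing_by exact pvDiv10_lt num h.1

def primeros_impares (num : Int) : List Int := primerosLoopA num []

-- ===== PORT B =====
-- [ord(c) - 48 for c in reversed(str(num)) if c in '13579'][:3]; ord(c) = c.toNat exactly
def primeros_impares_alt (num : Int) : List Int :=
  if num ≤ 0 then []
  else
    ((((PySem.Int.toStr num).toList.reverse.filter
        (fun c => "13579".toList.contains c)).map
        (fun c => (c.toNat : Int) - 48)).take 3)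

-- ===== PRECONDITION & SPEC =====
def Spec_primeros_impares (num : Int) (out : List Int) : Prop := out = primeros_impares_alt num
instance (num : Int) (out : List Int) : Decidable (Spec_primeros_impares num out) := by unfold Spec_primeros_impares; infer_instance

-- ===== CLAIM (what is proved, stated in full; the proofs are below) =====
def Claim_equal_primeros_impares : Prop := ∀ (num : Int), Dom_primeros_impares num → Spec_primeros_impares num (primeros_impares num)

-- ===== LEMMAS AND PROOFS =====

-- the least-significant-first decimal digits of a natural number
def natDigits (n : Nat) : List Nat :=
  if h : n = 0 then [] else n % 10 :: natDigits (n / 10)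
termination_by n
decreasing_by exact Nat.div_lt_self (Nat.pos_of_ne_zero h) (by norm_num)

theorem mem_natDigits_lt {d n : Nat} (h : d ∈ natDigits n) : d < 10 := by
  by_cases h0 : n = 0
  · rw [natDigits, dif_pos h0] at h; simp at h
  · rw [natDigits, dif_neg h0] at h
    rcases List.mem_cons.mp h with h1 | h1
    · omega
    · exact mem_natDigits_lt h1
termination_by n
decreasing_by exact Nat.div_lt_self (Nat.pos_of_ne_zero h0) (by norm_num)

-- Nat.toDigitsCore writes exactly the digits of n, most significant first, in front of ds
theorem toDigitsCore_eq (fuel : Nat) : ∀ (n : Nat) (ds : List Char), 0 < n → n ≤ fuel →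
    Nat.toDigitsCore 10 fuel n ds = ((natDigits n).map Nat.digitChar).reverse ++ ds := by
  induction fuel with
  | zero => intro n ds h hle; omega
  | succ fuel ih =>
    intro n ds h hle
    rw [Nat.toDigitsCore, natDigits, dif_neg (by omega)]
    by_cases h0 : n / 10 = 0
    · rw [if_pos h0, natDigits, dif_pos h0]
      simp
    · rw [if_neg h0, ih (n / 10) _ (by omega) (by omega : n / 10 ≤ fuel)]
      simp

theorem toChars_pos (num : Int) (h : 0 < num) :
    (PySem.Int.toStr num).toList = ((natDigits num.toNat).map Nat.digitChar).reverse := by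
  rw [PySem.Int.toList_toStr, PySem.Int.toChars, if_neg (by omega), Nat.toDigits,
    toDigitsCore_eq (num.toNat + 1) num.toNat [] (by omega) (by omega)]
  simp

-- the digit list of A's loop, accumulator-free, relating it to natDigits
def pvDigits (num : Int) : List Int :=
  if h : 0 < num then PySem.Int.mod num 10 :: pvDigits (PySem.Int.floordiv num 10) else []
termination_by num.toNat
decreasing_by exact pvDiv10_lt num h

theorem pvDigits_eq (num : Int) :
    pvDigits num = (natDigits num.toNat).map Int.ofNat := by
  by_cases h : 0 < num
  · rw [pvDigits, dif_pos h, natDigits, dif_neg (by omega)]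
    rw [pvDigits_eq (PySem.Int.floordiv num 10)]
    rw [PySem.Int.mod_eq_emod_of_pos (by norm_num), PySem.Int.floordiv_eq_ediv_of_pos (by norm_num)]
    rw [List.map_cons]
    have h1 : num % 10 = Int.ofNat (num.toNat % 10) := by simp only [Int.ofNat_eq_natCast]; omega
    have h2 : (num / 10).toNat = num.toNat / 10 := by omega
    rw [h1, h2]
  · rw [pvDigits, dif_neg h, natDigits, dif_pos (by omega)]
    rfl
termination_by num.toNat
decreasing_by exact pvDiv10_lt num h

-- A's loop equals take-(3 − |acc|) of the odd digits (proved by the loop's own recursion)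
theorem loopA_eq (num : Int) (acc : List Int) (hlen : acc.length ≤ 3) :
    primerosLoopA num acc =
      acc ++ ((pvDigits num).filter (fun d => PySem.Int.mod d 2 != 0)).take (3 - acc.length) := by
  by_cases h : 0 < num ∧ acc.length < 3
  · rw [primerosLoopA, dif_pos h, pvDigits, dif_pos h.1]
    dsimp only
    have hmod : PySem.Int.mod (PySem.Int.mod num 10) 2 = (num % 10) % 2 := by
      rw [PySem.Int.mod_eq_emod_of_pos (a := num) (by norm_num),
        PySem.Int.mod_eq_emod_of_pos (by norm_num)]
    by_cases hodd : es_impar (PySem.Int.mod num 10)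
    · have hm : num % 2 = 1 := by
        simp only [es_impar, bne_iff_ne, ne_eq, hmod] at hodd; omega
      rw [if_pos hodd,
        loopA_eq (PySem.Int.floordiv num 10) (acc ++ [PySem.Int.mod num 10]) (by simp; omega)]
      have h3 : 3 - acc.length = (2 - acc.length) + 1 := by omega
      simp [hm, h3, List.take_succ_cons]
    · have hm : ¬ (num % 2 = 1) := by
        simp only [es_impar, bne_iff_ne, ne_eq, not_not, hmod] at hodd; omega
      rw [if_neg hodd, loopA_eq (PySem.Int.floordiv num 10) acc (by omega)]
      simp [hm]
  · rw [primerosLoopA, dif_neg h]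
    rcases not_and_or.mp h with h1 | h2
    · rw [pvDigits, dif_neg h1]; simp
    · have : acc.length = 3 := by omega
      simp [this]
termination_by num.toNat
decreasing_by all_goals exact pvDiv10_lt num h.1

-- on single decimal digits, the character tests/conversions B does agree with A's arithmetic
theorem digitChar_odd (d : Nat) (h : d < 10) :
    ("13579".toList.contains (Nat.digitChar d)) = (PySem.Int.mod (Int.ofNat d) 2 != 0) := by
  interval_cases d <;> decide

theorem digitChar_val (d : Nat) (h : d < 10) :
    ((Nat.digitChar d).toNat : Int) - 48 = Int.ofNat d := by
  interval_cases d <;> decide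

-- the chain B runs over the digit characters equals the chain A's loop computes over the digits
theorem key_chain (l : List Nat) (h : ∀ d ∈ l, d < 10) :
    ((l.map Nat.digitChar).filter (fun c => "13579".toList.contains c)).map
        (fun c => (c.toNat : Int) - 48) =
      (l.map Int.ofNat).filter (fun d => PySem.Int.mod d 2 != 0) := by
  induction l with
  | nil => rfl
  | cons d l ih =>
    have hd : d < 10 := h d (List.mem_cons_self)
    have ih' := ih (fun x hx => h x (List.mem_cons_of_mem d hx))
    simp only [List.map_cons, List.filter_cons]
    rw [digitChar_odd d hd]
    cases hc : (PySem.Int.mod (Int.ofNat d) 2 != 0) with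
    | true =>
      rw [if_pos rfl, if_pos rfl, List.map_cons, digitChar_val d hd, ih']
    | false =>
      rw [if_neg (by decide), if_neg (by decide)]
      exact ih'

-- ===== VERDICT (by name: the statement is the Claim_ definition above) =====
theorem primeros_impares_spec : Claim_equal_primeros_impares := by
  intro num _
  unfold Spec_primeros_impares primeros_impares primeros_impares_alt
  rw [loopA_eq num [] (by simp), pvDigits_eq]
  by_cases h : num ≤ 0
  · rw [if_pos h, natDigits, dif_pos (by omega)]
    simp
  · rw [if_neg h, toChars_pos num (by omega), List.reverse_reverse,
      key_chain (natDigits num.toNat) (fun d hd => mem_natDigits_lt hd)]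
    simp
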